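-- pv_equiv track=rewrite | github.com/LEE-hyeon0771/Algorithm_Study | Study_2023/Baekjoon/baek_1043.py | max_party
-- ===== SOURCE A (Python) =====
-- def max_party(n, m, t_list, party):
--
--     changed = True
--
--     while changed:
--         changed = False
--         for j in party:
--             if set(j) & set(t_list):
--                 t_length = len(t_list)
--                 t_list = list(set(t_list).union(set(j)))
--                 if t_length != len(t_list):
--                     changed = True
--
--     answer = 0
--     for j in party:
--         if not set(j) & set(t_list):
--             answer += 1
--
--     return answer
-- ===== SOURCE B (Python) =====
-- def max_party(n, m, t_list, party):
--     # person -> indices of parties containing that person (built once)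
--     idx = {}
--     for i, members in enumerate(party):
--         for p in members:
--             idx.setdefault(p, []).append(i)
--     known = set(t_list)
--     stack = list(known)
--     hit = set()
--     while stack:
--         p = stack.pop()
--         for i in idx.get(p, []):
--             if i not in hit:
--                 hit.add(i)
--                 for q in party[i]:
--                     if q not in known:
--                         known.add(q)
--                         stack.append(q)
--     return sum(1 for i in range(len(party)) if i not in hit)
-- ===== Notes on version B (the rewrite author's own statement) =====
-- stated objective: faster
-- what changed: Replaces A's repeated whole-list saturation passes (re-building Python sets of t_list and each party on every probe) with a person-to-parties index built once plus a DFS worklist over newly-informed persons, marking hit parties; counts unmarked parties.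
-- outside the precondition, e.g. on max_party(0, 2, [1, 1], [[2, 3], [1, 2], [3, 9]]): A returns 1, B returns 0
import Mathlib
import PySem

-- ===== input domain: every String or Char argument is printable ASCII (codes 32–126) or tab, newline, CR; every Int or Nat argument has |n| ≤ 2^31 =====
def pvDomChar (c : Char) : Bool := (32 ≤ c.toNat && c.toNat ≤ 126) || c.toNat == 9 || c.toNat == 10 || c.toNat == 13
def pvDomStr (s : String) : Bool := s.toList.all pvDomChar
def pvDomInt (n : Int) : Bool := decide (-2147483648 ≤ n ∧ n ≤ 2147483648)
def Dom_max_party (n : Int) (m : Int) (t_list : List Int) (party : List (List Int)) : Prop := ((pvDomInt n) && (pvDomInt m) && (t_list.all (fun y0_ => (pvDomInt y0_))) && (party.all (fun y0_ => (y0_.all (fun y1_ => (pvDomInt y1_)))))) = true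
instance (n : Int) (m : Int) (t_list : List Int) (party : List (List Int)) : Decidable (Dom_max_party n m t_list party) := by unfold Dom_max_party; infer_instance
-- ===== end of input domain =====

-- B replaces A's repeated whole-list saturation passes with a one-pass person→parties
-- index and a DFS worklist over persons (asymptotically faster); equivalence is claimed
-- under Pre_ (t_list without duplicates, the task's natural domain).

-- ===== PORT A =====
-- one body of A's inner 'for j in party' loop; state = (t_list, changed)
def aStep (s : List Int × Bool) (j : List Int) : List Int × Bool :=
  if PySem.Set.inter (PySem.Set.ofList j) (PySem.Set.ofList s.1) ≠ [] then
    let t2 : PySem.Set Int := PySem.Set.union (PySem.Set.ofList s.1) (PySem.Set.ofList j)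
    (t2, if s.1.length ≠ t2.length then true else s.2)
  else s

-- A's 'while changed' loop (fuel bounds the number of passes; max_party supplies
-- enough fuel for the loop to always reach its fixed point — proved below)
def aLoop (party : List (List Int)) : Nat → List Int → List Int
  | 0, t => t
  | fuel+1, t =>
    let r := party.foldl aStep (t, false)
    if r.2 then aLoop party fuel r.1 else r.1

def max_party (n : Int) (m : Int) (t_list : List Int) (party : List (List Int)) : Int :=
  let t := aLoop party (t_list.length + (party.map List.length).sum + 1) t_list
  party.foldl (fun acc j =>
    if PySem.Set.inter (PySem.Set.ofList j) (PySem.Set.ofList t) = [] then acc + 1 else acc) 0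

-- ===== PORT B =====
-- Source B: idx = {};  for i, members in enumerate(party): for p in members: idx.setdefault(p, []).append(i)
def buildIdx (party : List (List Int)) : PySem.Dict Int (List Int) :=
  (PySem.List.enumerate party 0).foldl
    (fun d im => im.2.foldl (fun d p => d.insert p (d.getD p [] ++ [im.1])) d)
    PySem.Dict.empty

-- Source B: if q not in known: known.add(q); stack.append(q)   (stack top kept at the head)
def pushNew (s : PySem.Set Int × List Int) (q : Int) : PySem.Set Int × List Int :=
  if PySem.Set.contains s.1 q then s else (PySem.Set.add s.1 q, q :: s.2)

-- Source B: body of 'for i in idx.get(p, [])'; state = (known, stack, hit)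
-- party[i]: every i stored in idx is a valid index, so pyGetD is exact here
def visitParty (party : List (List Int)) (st : PySem.Set Int × List Int × PySem.Set Int)
    (i : Int) : PySem.Set Int × List Int × PySem.Set Int :=
  if PySem.Set.contains st.2.2 i then st
  else
    let hit := PySem.Set.add st.2.2 i
    let ks := (PySem.List.pyGetD party i []).foldl pushNew (st.1, st.2.1)
    (ks.1, ks.2, hit)

-- Source B: while stack: p = stack.pop(); for i in idx.get(p, []): …
def dfsRun (party : List (List Int)) (idx : PySem.Dict Int (List Int)) :
    Nat → (PySem.Set Int × List Int × PySem.Set Int) → PySem.Set Int × List Int × PySem.Set Int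
  | 0, st => st
  | fuel+1, st =>
    match h : st.2.1 with
    | [] => st
    | p :: rest => dfsRun party idx fuel ((idx.getD p []).foldl (visitParty party) (st.1, rest, st.2.2))

def max_party_alt (n : Int) (m : Int) (t_list : List Int) (party : List (List Int)) : Int :=
  let idx := buildIdx party
  let known : PySem.Set Int := PySem.Set.ofList t_list
  let r := dfsRun party idx (t_list.length + (party.map List.length).sum + 1)
      (known, known, PySem.Set.empty)
  (PySem.List.pyRange 0 (PySem.List.len party)).foldl
    (fun acc i => if PySem.Set.contains r.2.2 i then acc else acc + 1) 0

-- ===== PRECONDITION & SPEC =====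
-- Pre_ excludes t_list with duplicate entries — malformed input for this task (the
-- truth-knowers form a set): there A's len()-based change detection can silently stop
-- its propagation one round early and return a wrong count.
def Pre_max_party (n : Int) (m : Int) (t_list : List Int) (party : List (List Int)) : Prop :=
  t_list.Nodup
instance (n : Int) (m : Int) (t_list : List Int) (party : List (List Int)) : Decidable (Pre_max_party n m t_list party) := by unfold Pre_max_party; infer_instance

def pvWitness_max_party : Int × Int × List Int × List (List Int) := (4, 2, [1, 2], [[2, 3], [4]])

def Spec_max_party (n : Int) (m : Int) (t_list : List Int) (party : List (List Int)) (out : Int) : Prop := out = max_party_alt n m t_list party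
instance (n : Int) (m : Int) (t_list : List Int) (party : List (List Int)) (out : Int) : Decidable (Spec_max_party n m t_list party out) := by unfold Spec_max_party; infer_instance

-- ===== CLAIM (what is proved, stated in full; the proofs are below) =====
def Claim_equal_max_party : Prop := ∀ (n : Int) (m : Int) (t_list : List Int) (party : List (List Int)), Dom_max_party n m t_list party → Pre_max_party n m t_list party → Spec_max_party n m t_list party (max_party n m t_list party)

-- ===== LEMMAS AND PROOFS =====

-- x is a person who ends up knowing the truth: the least set containing t0 and closed
-- under "a party with a knowing member makes all its members know"
inductive Reach (party : List (List Int)) (t0 : List Int) : Int → Prop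
  | base {x : Int} : x ∈ t0 → Reach party t0 x
  | step {j : List Int} {y x : Int} : j ∈ party → y ∈ j → Reach party t0 y → x ∈ j → Reach party t0 x

theorem reach_min (party : List (List Int)) (t0 : List Int) (S : List Int)
    (hsub : ∀ x ∈ t0, x ∈ S)
    (hcl : ∀ j ∈ party, (∃ y ∈ j, y ∈ S) → ∀ x ∈ j, x ∈ S) :
    ∀ x : Int, Reach party t0 x → x ∈ S := by
  intro x h
  induction h with
  | base hx => exact hsub _ hx
  | step hj hy _ hx ih => exact hcl _ hj ⟨_, hy, ih⟩ _ hx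
theorem inter_ne_nil_iff (j t : List Int) :
    PySem.Set.inter (PySem.Set.ofList j) (PySem.Set.ofList t) ≠ [] ↔ ∃ y ∈ j, y ∈ t := by
  constructor
  · intro h
    obtain ⟨y, hy⟩ := List.exists_mem_of_ne_nil _ h
    have := (PySem.Set.mem_inter _ _ y).1 hy
    simp only [PySem.Set.mem_ofList] at this
    exact ⟨y, this.1, this.2⟩
  · rintro ⟨y, hyj, hyt⟩
    exact List.ne_nil_of_mem ((PySem.Set.mem_inter _ _ y).2
      ⟨(PySem.Set.mem_ofList _ _).2 hyj, (PySem.Set.mem_ofList _ _).2 hyt⟩)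
theorem aStep_mem (t : List Int) (ch : Bool) (j : List Int) (x : Int) :
    x ∈ (aStep (t, ch) j).1 ↔ x ∈ t ∨ (x ∈ j ∧ ∃ y ∈ j, y ∈ t) := by
  unfold aStep
  by_cases h : PySem.Set.inter (PySem.Set.ofList j) (PySem.Set.ofList t) ≠ []
  · rw [if_pos h]
    have hne := (inter_ne_nil_iff j t).1 h
    simp only [PySem.Set.mem_union, PySem.Set.mem_ofList]
    tauto
  · rw [if_neg h]
    push_neg at h
    have hne : ¬ ∃ y ∈ j, y ∈ t := by
      rw [← inter_ne_nil_iff]; simp [h]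
    show x ∈ t ↔ _
    exact ⟨fun hx => Or.inl hx, fun hx => hx.elim id (fun hj2 => absurd hj2.2 hne)⟩
theorem aStep_nodup (t : List Int) (ch : Bool) (j : List Int) (hn : t.Nodup) :
    (aStep (t, ch) j).1.Nodup := by
  unfold aStep
  split
  · exact PySem.Set.nodup_union _ _ (PySem.Set.nodup_ofList t)
  · exact hn
theorem aStep_false (t : List Int) (ch : Bool) (j : List Int) (hn : t.Nodup)
    (h : (aStep (t, ch) j).2 = false) :
    ch = false ∧ (aStep (t, ch) j).1 = t ∧ ((∃ y ∈ j, y ∈ t) → ∀ x ∈ j, x ∈ t) := by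
  unfold aStep at h ⊢
  by_cases hc : PySem.Set.inter (PySem.Set.ofList j) (PySem.Set.ofList t) ≠ []
  · rw [if_pos hc] at h ⊢
    simp only at h
    split at h
    · exact absurd h (by simp)
    · rename_i hlen
      push_neg at hlen
      have hofl : PySem.Set.ofList t = t := PySem.Set.ofList_eq_self_of_nodup t hn
      have hu : PySem.Set.union (PySem.Set.ofList t) (PySem.Set.ofList j)
          = t ++ List.filter (fun y => !(PySem.Set.contains t y)) (PySem.Set.ofList (PySem.Set.ofList j)) := by
        show PySem.Set.update _ _ = _
        rw [PySem.Set.update_eq_append_filter, hofl]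
      have hflt : List.filter (fun y => !(PySem.Set.contains t y)) (PySem.Set.ofList (PySem.Set.ofList j)) = [] := by
        have hl : (PySem.Set.union (PySem.Set.ofList t) (PySem.Set.ofList j)).length = t.length := by
          rw [hofl] at hlen ⊢; omega
        rw [hu, List.length_append] at hl
        exact List.eq_nil_of_length_eq_zero (by omega)
      have hun : PySem.Set.union (PySem.Set.ofList t) (PySem.Set.ofList j) = t := by
        rw [hu, hflt, List.append_nil]
      refine ⟨h, hun, ?_⟩
      intro _ x hx
      have : x ∈ PySem.Set.union (PySem.Set.ofList t) (PySem.Set.ofList j) :=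
        (PySem.Set.mem_union _ _ x).2 (Or.inr ((PySem.Set.mem_ofList _ _).2 hx))
      rwa [hun] at this
  · rw [if_neg hc] at h ⊢
    refine ⟨h, rfl, ?_⟩
    intro hex
    exact absurd ((inter_ne_nil_iff j t).2 hex) hc
theorem aStep_len (t : List Int) (ch : Bool) (j : List Int) (hn : t.Nodup) :
    t.length ≤ (aStep (t, ch) j).1.length := by
  unfold aStep
  split
  · show t.length ≤ (PySem.Set.update _ _).length
    rw [PySem.Set.update_eq_append_filter, PySem.Set.ofList_eq_self_of_nodup t hn]
    simp
  · simp
theorem aStep_flag (s : List Int × Bool) (j : List Int) (h : s.2 = true) : (aStep s j).2 = true := by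
  unfold aStep
  split
  · simp only
    split
    · rfl
    · exact h
  · exact h

theorem pass_flag_mono (L : List (List Int)) : ∀ s : List Int × Bool, s.2 = true →
    (L.foldl aStep s).2 = true := by
  induction L with
  | nil => intro s h; exact h
  | cons j L ih => intro s h; exact ih _ (aStep_flag s j h)
theorem pass_facts (L : List (List Int)) : ∀ (t : List Int) (ch : Bool), t.Nodup →
    (L.foldl aStep (t, ch)).1.Nodup ∧ (∀ x ∈ t, x ∈ (L.foldl aStep (t, ch)).1) ∧
    t.length ≤ (L.foldl aStep (t, ch)).1.length ∧
    (∀ x ∈ (L.foldl aStep (t, ch)).1, x ∈ t ∨ ∃ j ∈ L, x ∈ j) := by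
  induction L with
  | nil => intro t ch hn; exact ⟨hn, fun x hx => hx, le_refl _, fun x hx => Or.inl hx⟩
  | cons j L ih =>
    intro t ch hn
    simp only [List.foldl_cons]
    have hstep : aStep (t, ch) j = ((aStep (t, ch) j).1, (aStep (t, ch) j).2) := rfl
    rw [hstep]
    obtain ⟨h1, h2, h3, h4⟩ := ih (aStep (t, ch) j).1 (aStep (t, ch) j).2 (aStep_nodup t ch j hn)
    refine ⟨h1, ?_, ?_, ?_⟩
    · intro x hx
      exact h2 x ((aStep_mem t ch j x).2 (Or.inl hx))
    · exact le_trans (aStep_len t ch j hn) h3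
    · intro x hx
      rcases h4 x hx with h | ⟨j', hj', hx'⟩
      · rcases (aStep_mem t ch j x).1 h with h' | h'
        · exact Or.inl h'
        · exact Or.inr ⟨j, List.mem_cons_self, h'.1⟩
      · exact Or.inr ⟨j', List.mem_cons_of_mem _ hj', hx'⟩
theorem pass_reach (party : List (List Int)) (t0 : List Int) :
    ∀ (L : List (List Int)) (t : List Int) (ch : Bool), (∀ j ∈ L, j ∈ party) →
    (∀ x ∈ t, Reach party t0 x) → ∀ x ∈ (L.foldl aStep (t, ch)).1, Reach party t0 x := by
  intro L
  induction L with
  | nil => intro t ch _ ht x hx; exact ht x hx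
  | cons j L ih =>
    intro t ch hL ht x hx
    simp only [List.foldl_cons] at hx
    have hstep : aStep (t, ch) j = ((aStep (t, ch) j).1, (aStep (t, ch) j).2) := rfl
    rw [hstep] at hx
    refine ih _ _ (fun j' hj' => hL j' (List.mem_cons_of_mem _ hj')) ?_ x hx
    intro z hz
    rcases (aStep_mem t ch j z).1 hz with h | ⟨hzj, y, hyj, hyt⟩
    · exact ht z h
    · exact Reach.step (hL j List.mem_cons_self) hyj (ht y hyt) hzj
theorem pass_false (L : List (List Int)) : ∀ (t : List Int) (ch : Bool), t.Nodup →
    (L.foldl aStep (t, ch)).2 = false →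
    ch = false ∧ (L.foldl aStep (t, ch)).1 = t ∧
    (∀ j ∈ L, (∃ y ∈ j, y ∈ t) → ∀ x ∈ j, x ∈ t) := by
  induction L with
  | nil => intro t ch hn h; exact ⟨h, rfl, by simp⟩
  | cons j L ih =>
    intro t ch hn h
    simp only [List.foldl_cons] at h ⊢
    have hstep : aStep (t, ch) j = ((aStep (t, ch) j).1, (aStep (t, ch) j).2) := rfl
    rw [hstep] at h ⊢
    have hs1 : (aStep (t, ch) j).2 = false := by
      by_contra hc
      have := pass_flag_mono L ((aStep (t, ch) j).1, (aStep (t, ch) j).2)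
        (by simp only []; exact Bool.eq_true_of_not_eq_false hc)
      rw [h] at this; exact Bool.false_ne_true this
    obtain ⟨hch, heq, hcl⟩ := aStep_false t ch j hn hs1
    rw [heq] at h ⊢
    obtain ⟨_, h2, h3⟩ := ih t (aStep (t, ch) j).2 hn h
    exact ⟨hch, h2, fun j' hj' => by
      rcases List.mem_cons.1 hj' with rfl | hj'
      · exact hcl
      · exact h3 j' hj'⟩
theorem pass_true (L : List (List Int)) : ∀ t : List Int, t.Nodup →
    (L.foldl aStep (t, false)).2 = true →
    t.length < (L.foldl aStep (t, false)).1.length := by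
  induction L with
  | nil => intro t hn h; simp at h
  | cons j L ih =>
    intro t hn h
    simp only [List.foldl_cons] at h ⊢
    have hstep : aStep (t, false) j = ((aStep (t, false) j).1, (aStep (t, false) j).2) := rfl
    rw [hstep] at h ⊢
    by_cases hs1 : (aStep (t, false) j).2 = true
    · -- flag set at the head step: head strictly grew the list
      have hlt : t.length < (aStep (t, false) j).1.length := by
        have hle := aStep_len t false j hn
        rcases lt_or_eq_of_le hle with h' | h'
        · exact h'
        · exfalso
          -- equal length with flag set is impossible
          unfold aStep at hs1 h'
          by_cases hc : PySem.Set.inter (PySem.Set.ofList j) (PySem.Set.ofList t) ≠ []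
          · rw [if_pos hc] at hs1 h'
            simp only at hs1 h'
            split at hs1
            · omega
            · simp at hs1
          · rw [if_neg hc] at hs1
            simp at hs1
      have := (pass_facts L (aStep (t, false) j).1 (aStep (t, false) j).2
        (aStep_nodup t false j hn)).2.2.1
      omega
    · have hs1' : (aStep (t, false) j).2 = false := Bool.eq_false_iff.2 hs1
      obtain ⟨_, heq, _⟩ := aStep_false t false j hn hs1'
      rw [heq, hs1'] at h ⊢
      exact ih t hn h
theorem nodup_len_le (t u : List Int) (hn : t.Nodup) (hsub : ∀ x ∈ t, x ∈ u) :
    t.length ≤ (PySem.Set.ofList u).length := by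
  have h1 : t.toFinset.card = t.length := List.toFinset_card_of_nodup hn
  have h2 : (PySem.Set.ofList u).toFinset.card = (PySem.Set.ofList u).length :=
    List.toFinset_card_of_nodup (PySem.Set.nodup_ofList u)
  have h3 : t.toFinset ⊆ (PySem.Set.ofList u).toFinset := by
    intro x hx
    rw [List.mem_toFinset] at hx ⊢
    exact (PySem.Set.mem_ofList u x).2 (hsub x hx)
  have := Finset.card_le_card h3
  omega
theorem aLoop_good (party : List (List Int)) (t0 : List Int) :
    ∀ (fuel : Nat) (t : List Int), t.Nodup → (∀ x ∈ t0, x ∈ t) →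
    (∀ x ∈ t, Reach party t0 x) → (∀ x ∈ t, x ∈ t0 ++ party.flatten) →
    (PySem.Set.ofList (t0 ++ party.flatten)).length < fuel + t.length →
    (∀ x ∈ t0, x ∈ aLoop party fuel t) ∧
    (∀ x ∈ aLoop party fuel t, Reach party t0 x) ∧
    (∀ j ∈ party, (∃ y ∈ j, y ∈ aLoop party fuel t) → ∀ x ∈ j, x ∈ aLoop party fuel t) := by
  intro fuel
  induction fuel with
  | zero =>
    intro t hn hsup hre hsnd hbound
    exact absurd (nodup_len_le t _ hn hsnd) (by omega)
  | succ fuel ih =>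
    intro t hn hsup hre hsnd hbound
    show _ ∧ _
    unfold aLoop
    simp only
    by_cases hch : (party.foldl aStep (t, false)).2 = true
    · rw [if_pos hch]
      have hgrow := pass_true party t hn hch
      obtain ⟨hn', hsup', _, hsnd'⟩ := pass_facts party t false hn
      refine ih (party.foldl aStep (t, false)).1 hn'
        (fun x hx => hsup' x (hsup x hx))
        (pass_reach party t0 party t false (fun _ h => h) hre)
        ?_ (by omega)
      intro x hx
      rcases hsnd' x hx with h | ⟨j, hj, hxj⟩
      · exact hsnd x h
      · exact List.mem_append.2 (Or.inr (List.mem_flatten.2 ⟨j, hj, hxj⟩))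
    · have hch' : (party.foldl aStep (t, false)).2 = false := Bool.eq_false_iff.2 hch
      rw [if_neg (by simp [hch'])]
      obtain ⟨_, heq, hcl⟩ := pass_false party t false hn hch'
      rw [heq]
      exact ⟨hsup, hre, hcl⟩
-- A's final t_list is exactly the reachable set
theorem A_final (t_list : List Int) (party : List (List Int)) (hn : t_list.Nodup) :
    ∀ x : Int, x ∈ aLoop party (t_list.length + (party.map List.length).sum + 1) t_list ↔
      Reach party t_list x := by
  have hbound : (PySem.Set.ofList (t_list ++ party.flatten)).length <
      (t_list.length + (party.map List.length).sum + 1) + t_list.length := by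
    have h1 := PySem.Set.length_ofList_le (t_list ++ party.flatten)
    have h2 : (t_list ++ party.flatten).length = t_list.length + (party.map List.length).sum := by
      rw [List.length_append, List.length_flatten]
    omega
  obtain ⟨hsup, hre, hcl⟩ := aLoop_good party t_list
    (t_list.length + (party.map List.length).sum + 1) t_list hn (fun _ h => h)
    (fun x hx => Reach.base hx) (fun x hx => List.mem_append.2 (Or.inl hx)) hbound
  intro x
  exact ⟨hre x, reach_min party t_list _ hsup hcl x⟩
-- ===== B-side =====

theorem idx_inner (iv : Int) : ∀ (ms : List Int) (d : PySem.Dict Int (List Int)) (p x : Int),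
    x ∈ (ms.foldl (fun d q => d.insert q (d.getD q [] ++ [iv])) d).getD p [] ↔
      x ∈ d.getD p [] ∨ (p ∈ ms ∧ x = iv) := by
  intro ms
  induction ms with
  | nil => intro d p x; simp
  | cons q ms ih =>
    intro d p x
    simp only [List.foldl_cons]
    rw [ih]
    rw [PySem.Dict.getD_insert]
    by_cases hpq : p = q
    · subst hpq
      rw [if_pos rfl]
      simp only [List.mem_append, List.mem_singleton, List.mem_cons, true_or, true_and]
      tauto
    · rw [if_neg hpq]
      simp only [List.mem_cons]
      have : ¬ p = q := hpq
      tauto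
theorem idx_outer : ∀ (xs : List (List Int)) (s : Int) (d : PySem.Dict Int (List Int)) (p i : Int),
    i ∈ ((PySem.List.enumerate xs s).foldl
        (fun d im => im.2.foldl (fun d q => d.insert q (d.getD q [] ++ [im.1])) d) d).getD p [] ↔
      i ∈ d.getD p [] ∨ ∃ k : Nat, k < xs.length ∧ i = s + k ∧ p ∈ xs.getD k [] := by
  intro xs
  induction xs with
  | nil => intro s d p i; simp [PySem.List.enumerate]
  | cons x0 xs ih =>
    intro s d p i
    rw [PySem.List.enumerate_cons]
    simp only [List.foldl_cons]
    rw [ih, idx_inner]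
    constructor
    · rintro ((h | ⟨hpx, rfl⟩) | ⟨k, hk, rfl, hpk⟩)
      · exact Or.inl h
      · exact Or.inr ⟨0, by simp, by simp, by simpa using hpx⟩
      · exact Or.inr ⟨k + 1, by simpa using hk, by push_cast; ring, by simpa using hpk⟩
    · rintro (h | ⟨k, hk, rfl, hpk⟩)
      · exact Or.inl (Or.inl h)
      · cases k with
        | zero => exact Or.inl (Or.inr ⟨by simpa using hpk, by simp⟩)
        | succ k =>
          refine Or.inr ⟨k, by simpa using hk, by push_cast; ring, by simpa using hpk⟩
theorem idx_char (party : List (List Int)) (p i : Int) :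
    i ∈ (buildIdx party).getD p [] ↔
      0 ≤ i ∧ i < (party.length : Int) ∧ p ∈ PySem.List.pyGetD party i [] := by
  unfold buildIdx
  rw [idx_outer]
  constructor
  · rintro (h | ⟨k, hk, rfl, hpk⟩)
    · exfalso; simp [PySem.Dict.empty, PySem.Dict.getD, PySem.Dict.get?] at h
    · refine ⟨by positivity, by simpa using (Int.ofNat_lt.2 hk), ?_⟩
      rw [zero_add, PySem.List.pyGetD_natCast]; exact hpk
  · rintro ⟨h0, h1, hp⟩
    refine Or.inr ⟨i.toNat, ?_, by omega, ?_⟩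
    · omega
    · have hti : (i.toNat : Int) = i := Int.toNat_of_nonneg h0
      rw [← hti, PySem.List.pyGetD_natCast] at hp
      exact hp
def sumUnhit (party : List (List Int)) (H : List Int) : Nat :=
  ∑ k ∈ Finset.range party.length,
    if (k : Int) ∈ H then 0 else (PySem.List.pyGetD party (k : Int) []).length

-- invariant of the DFS; st = (known, stack, hit); extra = persons allowed to be
-- known-but-not-on-stack for a not-yet-hit party (the popped person, paired with the
-- list of party indices still to be processed)
def BInvP (party : List (List Int)) (t0 : List Int) (p : Int) (L : List Int)
    (st : PySem.Set Int × List Int × PySem.Set Int) : Prop :=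
  st.1.Nodup ∧ st.2.2.Nodup ∧
  (∀ x ∈ t0, x ∈ st.1) ∧
  (∀ x ∈ st.1, Reach party t0 x) ∧
  (∀ x ∈ st.2.1, x ∈ st.1) ∧
  (∀ i ∈ st.2.2, 0 ≤ i ∧ i < (party.length : Int) ∧
     (∃ y ∈ PySem.List.pyGetD party i [], y ∈ st.1) ∧
     (∀ q ∈ PySem.List.pyGetD party i [], q ∈ st.1)) ∧
  (∀ i : Int, 0 ≤ i → i < (party.length : Int) → i ∉ st.2.2 →
     ∀ q ∈ PySem.List.pyGetD party i [], q ∈ st.1 → q ∈ st.2.1 ∨ (q = p ∧ i ∈ L))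

def BInv (party : List (List Int)) (t0 : List Int)
    (st : PySem.Set Int × List Int × PySem.Set Int) : Prop :=
  BInvP party t0 0 [] st

theorem pushNew_facts : ∀ (ms : List Int) (K : PySem.Set Int) (S : List Int), K.Nodup →
    (ms.foldl pushNew (K, S)).1.Nodup ∧
    (∀ x, x ∈ (ms.foldl pushNew (K, S)).1 ↔ x ∈ K ∨ x ∈ ms) ∧
    (∀ x ∈ S, x ∈ (ms.foldl pushNew (K, S)).2) ∧
    (∀ x ∈ (ms.foldl pushNew (K, S)).2, x ∈ S ∨ x ∈ (ms.foldl pushNew (K, S)).1) ∧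
    (∀ q ∈ ms, q ∈ K ∨ q ∈ (ms.foldl pushNew (K, S)).2) ∧
    (ms.foldl pushNew (K, S)).2.length ≤ S.length + ms.length := by
  intro ms
  induction ms with
  | nil =>
    intro K S hn
    exact ⟨hn, by simp, fun x hx => hx, fun x hx => Or.inl hx, by simp, by simp⟩
  | cons q0 ms ih =>
    intro K S hn
    simp only [List.foldl_cons]
    by_cases hq : PySem.Set.contains K q0 = true
    · have hq' : q0 ∈ K := (PySem.Set.contains_iff K q0).1 hq
      rw [pushNew, if_pos hq]
      obtain ⟨i1, i2, i3, i4, i5, i6⟩ := ih K S hn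
      refine ⟨i1, ?_, i3, ?_, ?_, by simp only [List.length_cons] at i6 ⊢; omega⟩
      · intro x; rw [i2]; simp only [List.mem_cons]
        constructor
        · rintro (h | h)
          · exact Or.inl h
          · exact Or.inr (Or.inr h)
        · rintro (h | rfl | h)
          · exact Or.inl h
          · exact Or.inl hq'
          · exact Or.inr h
      · intro x hx; exact i4 x hx
      · intro q hqm
        rcases List.mem_cons.1 hqm with rfl | h
        · exact Or.inl hq'
        · exact i5 q h
    · have hq' : q0 ∉ K := fun h => hq ((PySem.Set.contains_iff K q0).2 h)
      rw [pushNew, if_neg hq]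
      simp only
      obtain ⟨i1, i2, i3, i4, i5, i6⟩ := ih (PySem.Set.add K q0) (q0 :: S) (PySem.Set.nodup_add K q0 hn)
      refine ⟨i1, ?_, ?_, ?_, ?_, by simp only [List.length_cons] at i6 ⊢; omega⟩
      · intro x
        rw [i2, PySem.Set.mem_add]
        simp only [List.mem_cons]
        tauto
      · intro x hx
        exact i3 x (List.mem_cons_of_mem _ hx)
      · intro x hx
        rcases i4 x hx with h | h
        · rcases List.mem_cons.1 h with h0 | h'
          · exact Or.inr ((i2 x).2 (Or.inl ((PySem.Set.mem_add K q0 x).2 (Or.inr h0))))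
          · exact Or.inl h'
        · exact Or.inr h
      · intro q hqm
        rcases List.mem_cons.1 hqm with rfl | h
        · exact Or.inr (i3 q List.mem_cons_self)
        · rcases i5 q h with h' | h'
          · rcases (PySem.Set.mem_add K q0 q).1 h' with h'' | rfl
            · exact Or.inl h''
            · exact Or.inr (i3 q List.mem_cons_self)
          · exact Or.inr h'
theorem sumUnhit_add (party : List (List Int)) (H : List Int) (i : Int)
    (h0 : 0 ≤ i) (h1 : i < (party.length : Int)) (hi : i ∉ H) :
    sumUnhit party (PySem.Set.add H i) + (PySem.List.pyGetD party i []).length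
      = sumUnhit party H := by
  unfold sumUnhit
  have hterm : ∀ k ∈ Finset.range party.length,
      (if (k : Int) ∈ H then 0 else (PySem.List.pyGetD party (k : Int) []).length)
      = (if (k : Int) ∈ PySem.Set.add H i then 0 else (PySem.List.pyGetD party (k : Int) []).length)
        + (if k = i.toNat then (PySem.List.pyGetD party i []).length else 0) := by
    intro k _
    by_cases hk : k = i.toNat
    · subst hk
      have hcast : ((i.toNat : Nat) : Int) = i := Int.toNat_of_nonneg h0
      rw [hcast, if_neg hi, if_pos ((PySem.Set.mem_add H i i).2 (Or.inr rfl)), if_pos rfl]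
      omega
    · have hne : (k : Int) ≠ i := by omega
      rw [if_neg hk]
      have : ((k : Int) ∈ PySem.Set.add H i) ↔ (k : Int) ∈ H := by
        rw [PySem.Set.mem_add]
        exact ⟨fun h => h.elim id (fun h' => absurd h' hne), Or.inl⟩
      by_cases hH : (k : Int) ∈ H
      · rw [if_pos hH, if_pos (this.2 hH)]
      · rw [if_neg hH, if_neg (fun h => hH (this.1 h))]
        omega
  rw [Finset.sum_congr rfl hterm, Finset.sum_add_distrib]
  have hlast : (∑ k ∈ Finset.range party.length,
      if k = i.toNat then (PySem.List.pyGetD party i []).length else 0)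
      = (PySem.List.pyGetD party i []).length := by
    rw [Finset.sum_ite_eq' (Finset.range party.length) i.toNat
      (fun _ => (PySem.List.pyGetD party i []).length)]
    rw [if_pos (by rw [Finset.mem_range]; omega)]
  rw [hlast]
theorem pyGetD_self_mem (party : List (List Int)) (i : Int)
    (h0 : 0 ≤ i) (h1 : i < (party.length : Int)) :
    PySem.List.pyGetD party i [] ∈ party := by
  rw [PySem.List.pyGetD_eq_getElem party [] h0 h1]
  exact List.getElem_mem _

theorem visitFold (party : List (List Int)) (t0 : List Int) (p : Int) :
    ∀ (L : List Int) (st : PySem.Set Int × List Int × PySem.Set Int),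
    (∀ i ∈ L, 0 ≤ i ∧ i < (party.length : Int) ∧ p ∈ PySem.List.pyGetD party i []) →
    p ∈ st.1 → BInvP party t0 p L st →
    BInvP party t0 p [] (L.foldl (visitParty party) st) ∧
    (L.foldl (visitParty party) st).2.1.length + sumUnhit party (L.foldl (visitParty party) st).2.2
      ≤ st.2.1.length + sumUnhit party st.2.2 := by
  intro L
  induction L with
  | nil => intro st _ _ hinv; exact ⟨hinv, le_refl _⟩
  | cons i L ih =>
    rintro ⟨K, S, H⟩ hsound hp hinv
    obtain ⟨hi0, hi1, hip⟩ := hsound i List.mem_cons_self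
    obtain ⟨n1, n2, n3, n4, n5, n6, n7⟩ := hinv
    simp only [List.foldl_cons]
    by_cases hHi : PySem.Set.contains H i = true
    · have hmem : i ∈ H := (PySem.Set.contains_iff H i).1 hHi
      have hvp : visitParty party (K, S, H) i = (K, S, H) := by
        unfold visitParty; rw [if_pos hHi]
      rw [hvp]
      refine ih (K, S, H) (fun i' h' => hsound i' (List.mem_cons_of_mem _ h')) hp
        ⟨n1, n2, n3, n4, n5, n6, ?_⟩
      intro i' h0 h1 hni q hq hqK
      rcases n7 i' h0 h1 hni q hq hqK with h | ⟨hqp, hiL⟩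
      · exact Or.inl h
      · rcases List.mem_cons.1 hiL with heq | h'
        · exact absurd (heq ▸ hmem) hni
        · exact Or.inr ⟨hqp, h'⟩
    · have hnmem : i ∉ H := fun h => hHi ((PySem.Set.contains_iff H i).2 h)
      have hvp : visitParty party (K, S, H) i =
          (((PySem.List.pyGetD party i []).foldl pushNew (K, S)).1,
           ((PySem.List.pyGetD party i []).foldl pushNew (K, S)).2,
           PySem.Set.add H i) := by
        unfold visitParty; rw [if_neg hHi]
      rw [hvp]
      obtain ⟨m1, m2, m3, m4, m5, m6⟩ := pushNew_facts (PySem.List.pyGetD party i []) K S n1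
      have hreachp : Reach party t0 p := n4 p hp
      have hjmem : PySem.List.pyGetD party i [] ∈ party := pyGetD_self_mem party i hi0 hi1
      have hKmono : ∀ x ∈ K, x ∈ ((PySem.List.pyGetD party i []).foldl pushNew (K, S)).1 :=
        fun x hx => (m2 x).2 (Or.inl hx)
      have hmsin : ∀ x ∈ PySem.List.pyGetD party i [],
          x ∈ ((PySem.List.pyGetD party i []).foldl pushNew (K, S)).1 :=
        fun x hx => (m2 x).2 (Or.inr hx)
      have hinv' : BInvP party t0 p L
          (((PySem.List.pyGetD party i []).foldl pushNew (K, S)).1,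
           ((PySem.List.pyGetD party i []).foldl pushNew (K, S)).2,
           PySem.Set.add H i) := by
        refine ⟨m1, PySem.Set.nodup_add H i n2, ?_, ?_, ?_, ?_, ?_⟩
        · exact fun x hx => hKmono x (n3 x hx)
        · intro x hx
          rcases (m2 x).1 hx with h | h
          · exact n4 x h
          · exact Reach.step hjmem hip hreachp h
        · intro x hx
          rcases m4 x hx with h | h
          · exact hKmono x (n5 x h)
          · exact h
        · intro i' hi'
          rcases (PySem.Set.mem_add H i i').1 hi' with h | rfl
          · obtain ⟨b0, b1, ⟨y, hy, hyK⟩, hall⟩ := n6 i' h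
            exact ⟨b0, b1, ⟨y, hy, hKmono y hyK⟩, fun q hq => hKmono q (hall q hq)⟩
          · exact ⟨hi0, hi1, ⟨p, hip, hKmono p hp⟩, fun q hq => hmsin q hq⟩
        · intro i' h0 h1 hni q hq hqK
          have hne : i' ≠ i := fun he => hni (he ▸ (PySem.Set.mem_add H i i).2 (Or.inr rfl))
          have hni' : i' ∉ H := fun h => hni ((PySem.Set.mem_add H i i').2 (Or.inl h))
          by_cases hqms : q ∈ PySem.List.pyGetD party i []
          · rcases m5 q hqms with h | h
            · rcases n7 i' h0 h1 hni' q hq h with h' | ⟨hqp, hiL⟩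
              · exact Or.inl (m3 q h')
              · rcases List.mem_cons.1 hiL with heq | h''
                · exact absurd heq hne
                · exact Or.inr ⟨hqp, h''⟩
            · exact Or.inl h
          · have hqK' : q ∈ K := by
              rcases (m2 q).1 hqK with h | h
              · exact h
              · exact absurd h hqms
            rcases n7 i' h0 h1 hni' q hq hqK' with h' | ⟨hqp, hiL⟩
            · exact Or.inl (m3 q h')
            · rcases List.mem_cons.1 hiL with heq | h''
              · exact absurd heq hne
              · exact Or.inr ⟨hqp, h''⟩
      obtain ⟨hres, hmeas⟩ := ih _ (fun i' h' => hsound i' (List.mem_cons_of_mem _ h'))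
        (hKmono p hp) hinv'
      refine ⟨hres, le_trans hmeas ?_⟩
      have hsum := sumUnhit_add party H i hi0 hi1 hnmem
      simp only
      omega


theorem BInvP_nil_swap (party : List (List Int)) (t0 : List Int) (p p' : Int)
    (st : PySem.Set Int × List Int × PySem.Set Int)
    (h : BInvP party t0 p [] st) : BInvP party t0 p' [] st := by
  obtain ⟨n1, n2, n3, n4, n5, n6, n7⟩ := h
  refine ⟨n1, n2, n3, n4, n5, n6, ?_⟩
  intro i h0 h1 hni q hq hqK
  rcases n7 i h0 h1 hni q hq hqK with h | ⟨_, habs⟩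
  · exact Or.inl h
  · exact absurd habs (List.not_mem_nil)

theorem dfs_run (party : List (List Int)) (t0 : List Int) :
    ∀ (fuel : Nat) (st : PySem.Set Int × List Int × PySem.Set Int),
    BInv party t0 st → st.2.1.length + sumUnhit party st.2.2 < fuel →
    BInv party t0 (dfsRun party (buildIdx party) fuel st) ∧
    (dfsRun party (buildIdx party) fuel st).2.1 = [] := by
  intro fuel
  induction fuel with
  | zero => intro st _ hm; exact absurd hm (Nat.not_lt_zero _)
  | succ fuel ih =>
    rintro ⟨K, stk, H⟩ hinv hm
    cases stk with
    | nil => exact ⟨hinv, rfl⟩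
    | cons p rest =>
      obtain ⟨n1, n2, n3, n4, n5, n6, n7⟩ := hinv
      have hred : dfsRun party (buildIdx party) (fuel+1) (K, p :: rest, H)
          = dfsRun party (buildIdx party) fuel
              (((buildIdx party).getD p []).foldl (visitParty party) (K, rest, H)) := rfl
      rw [hred]
      have hsound : ∀ i ∈ (buildIdx party).getD p [],
          0 ≤ i ∧ i < (party.length : Int) ∧ p ∈ PySem.List.pyGetD party i [] :=
        fun i hi => (idx_char party p i).1 hi
      have hpK : p ∈ K := n5 p List.mem_cons_self
      have hinv' : BInvP party t0 p ((buildIdx party).getD p []) (K, rest, H) := by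
        refine ⟨n1, n2, n3, n4, fun x hx => n5 x (List.mem_cons_of_mem _ hx), n6, ?_⟩
        intro i' h0 h1 hni q hq hqK
        rcases n7 i' h0 h1 hni q hq hqK with h | ⟨_, habs⟩
        · rcases List.mem_cons.1 h with rfl | h'
          · exact Or.inr ⟨rfl, (idx_char party q i').2 ⟨h0, h1, hq⟩⟩
          · exact Or.inl h'
        · exact absurd habs (List.not_mem_nil)
      obtain ⟨hres, hmeas⟩ := visitFold party t0 p ((buildIdx party).getD p [])
        (K, rest, H) hsound hpK hinv'
      refine ih _ (BInvP_nil_swap party t0 p 0 _ hres) ?_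
      simp only [List.length_cons] at hm
      simp only at hmeas
      omega

theorem getD_sum (xs : List (List Int)) :
    (∑ k ∈ Finset.range xs.length, (xs.getD k []).length) = (xs.map List.length).sum := by
  induction xs with
  | nil => simp
  | cons j rest ih =>
    rw [List.length_cons, Finset.sum_range_succ']
    simp only [List.getD_cons_succ, List.getD_cons_zero, List.map_cons, List.sum_cons, ih]
    omega

theorem sum_lengths (party : List (List Int)) :
    sumUnhit party [] = (party.map List.length).sum := by
  unfold sumUnhit
  rw [← getD_sum party]
  refine Finset.sum_congr rfl ?_
  intro k hk
  rw [if_neg (List.not_mem_nil), PySem.List.pyGetD_natCast]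

-- B's final state characterized via Reach
theorem B_final (t_list : List Int) (party : List (List Int)) :
    ∀ i : Int, 0 ≤ i → i < (party.length : Int) →
      ((i ∈ (dfsRun party (buildIdx party) (t_list.length + (party.map List.length).sum + 1)
          (PySem.Set.ofList t_list, PySem.Set.ofList t_list, PySem.Set.empty)).2.2) ↔
        ∃ y ∈ PySem.List.pyGetD party i [], Reach party t_list y) := by
  have hinv0 : BInv party t_list
      (PySem.Set.ofList t_list, PySem.Set.ofList t_list, PySem.Set.empty) := by
    refine ⟨PySem.Set.nodup_ofList t_list, List.nodup_nil,
      fun x hx => (PySem.Set.mem_ofList t_list x).2 hx,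
      fun x hx => Reach.base ((PySem.Set.mem_ofList t_list x).1 hx),
      fun x hx => hx, fun i hi => absurd hi (List.not_mem_nil), ?_⟩
    intro i _ _ _ q _ hqK
    exact Or.inl hqK
  have hmeas : (PySem.Set.ofList t_list).length + sumUnhit party PySem.Set.empty
      < t_list.length + (party.map List.length).sum + 1 := by
    have h1 := PySem.Set.length_ofList_le t_list
    have h2 : sumUnhit party PySem.Set.empty = (party.map List.length).sum := sum_lengths party
    omega
  obtain ⟨hb, hempty⟩ := dfs_run party t_list
    (t_list.length + (party.map List.length).sum + 1)
    (PySem.Set.ofList t_list, PySem.Set.ofList t_list, PySem.Set.empty) hinv0 hmeas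
  obtain ⟨n1, n2, n3, n4, n5, n6, n7⟩ := hb
  intro i h0 h1
  have hclosed : ∀ j ∈ party, (∃ y ∈ j, y ∈ (dfsRun party (buildIdx party)
      (t_list.length + (party.map List.length).sum + 1)
      (PySem.Set.ofList t_list, PySem.Set.ofList t_list, PySem.Set.empty)).1) → ∀ x ∈ j,
      x ∈ (dfsRun party (buildIdx party)
      (t_list.length + (party.map List.length).sum + 1)
      (PySem.Set.ofList t_list, PySem.Set.ofList t_list, PySem.Set.empty)).1 := by
    rintro j hj ⟨y, hyj, hyK⟩ x hxj
    obtain ⟨k, hk, hkj⟩ := List.mem_iff_getElem.1 hj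
    have hpg : PySem.List.pyGetD party (k : Int) [] = j := by
      rw [PySem.List.pyGetD_eq_getElem party [] (by positivity) (by exact_mod_cast hk)]
      simpa using hkj
    by_cases hiH : (k : Int) ∈ (dfsRun party (buildIdx party)
        (t_list.length + (party.map List.length).sum + 1)
        (PySem.Set.ofList t_list, PySem.Set.ofList t_list, PySem.Set.empty)).2.2
    · obtain ⟨_, _, _, hall⟩ := n6 _ hiH
      exact hall x (by rw [hpg]; exact hxj)
    · exfalso
      rcases n7 (k : Int) (by positivity) (by exact_mod_cast hk) hiH y
        (by rw [hpg]; exact hyj) hyK with h | ⟨_, habs⟩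
      · rw [hempty] at h; exact List.not_mem_nil h
      · exact List.not_mem_nil habs
  constructor
  · intro hi
    obtain ⟨_, _, ⟨y, hy, hyK⟩, _⟩ := n6 i hi
    exact ⟨y, hy, n4 y hyK⟩
  · rintro ⟨y, hy, hre⟩
    have hyK := reach_min party t_list _ n3 hclosed y hre
    by_contra hni
    rcases n7 i h0 h1 hni y hy hyK with h | ⟨_, habs⟩
    · rw [hempty] at h; exact List.not_mem_nil h
    · exact List.not_mem_nil habs

-- ===== VERDICT (by name: the statement is the Claim_ definition above) =====
theorem max_party_spec : Claim_equal_max_party := by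
  unfold Claim_equal_max_party
  intro n m t_list party _ hpre
  unfold Spec_max_party max_party max_party_alt
  have hnd : t_list.Nodup := hpre
  have hA := A_final t_list party hnd
  have hB := B_final t_list party
  set F := t_list.length + (party.map List.length).sum + 1 with hF
  set tf := aLoop party F t_list with htf
  set r := dfsRun party (buildIdx party) F
    (PySem.Set.ofList t_list, PySem.Set.ofList t_list, PySem.Set.empty) with hr
  conv_lhs => rw [← PySem.List.map_pyGetD_pyRange_zero party ([] : List Int)]
  rw [List.foldl_map]
  refine PySem.List.foldl_congr_mem _ _ _ _ ?_
  intro acc i hi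
  have hlen : PySem.List.len party = (party.length : Int) := rfl
  rw [hlen] at hi
  obtain ⟨h0, h1⟩ := PySem.List.mem_pyRange_one.1 hi
  have hBi := hB i h0 h1
  by_cases hex : ∃ y ∈ PySem.List.pyGetD party i [], y ∈ tf
  · have hexR : ∃ y ∈ PySem.List.pyGetD party i [], Reach party t_list y := by
      obtain ⟨y, hy, hyt⟩ := hex
      exact ⟨y, hy, (hA y).1 hyt⟩
    have hiH := hBi.2 hexR
    rw [if_neg ?_, if_pos ((PySem.Set.contains_iff _ i).2 hiH)]
    exact (inter_ne_nil_iff _ _).2 hex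
  · have hexR : ¬ ∃ y ∈ PySem.List.pyGetD party i [], Reach party t_list y := by
      rintro ⟨y, hy, hre⟩
      exact hex ⟨y, hy, (hA y).2 hre⟩
    have hniH : i ∉ r.2.2 := fun h => hexR (hBi.1 h)
    have hint : PySem.Set.inter (PySem.Set.ofList (PySem.List.pyGetD party i []))
        (PySem.Set.ofList tf) = [] := by
      by_contra h
      exact hex ((inter_ne_nil_iff _ _).1 h)
    rw [if_pos hint, if_neg ?_]
    intro h
    exact hniH ((PySem.Set.contains_iff _ i).1 h)
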